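-- pv_equiv track=rewrite | github.com/conda-forge/omniscidb-cpu-feedstock | recipe/run_sanity_tests.py | filter_thrift_errors
-- ===== SOURCE A (Python) =====
-- def filter_thrift_errors(out):
--     lines = []
--     flag = False
--     for line in out.splitlines(True):
--         if flag:
--             sline = line.lstrip()
--             if (sline.startswith('at ')
--                 or sline.startswith('...')
--                 or sline.startswith('Caused by: java.net.SocketException')
--                 or sline.startswith('org.apache.thrift.transport.TTransportException')):
--                 continue
--             flag = False
--         if 'Thrift error occurred during processing of message.' in line:
--             flag = True
--             lines.append(line.rstrip() + '  .....\n')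
--         else:
--             lines.append(line)
--     return ''.join(lines)
-- ===== SOURCE B (Python) =====
-- MARKER = 'Thrift error occurred during processing of message.'
--
--
-- def _is_stacktrace(line):
--     s = line.lstrip()
--     return (s.startswith('at ')
--             or s.startswith('...')
--             or s.startswith('Caused by: java.net.SocketException')
--             or s.startswith('org.apache.thrift.transport.TTransportException'))
--
--
-- def _dropped(lines, i):
--     # A line is dropped iff it looks like a stacktrace line and, scanning
--     # backwards, the first line that is a marker line or a non-stacktrace
--     # line is a marker line.
--     if not _is_stacktrace(lines[i]):
--         return False
--     for j in range(i - 1, -1, -1):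
--         if MARKER in lines[j]:
--             return True
--         if not _is_stacktrace(lines[j]):
--             return False
--     return False
--
--
-- def filter_thrift_errors(out):
--     lines = out.splitlines(True)
--     return ''.join(
--         lines[i].rstrip() + '  .....\n' if MARKER in lines[i] else lines[i]
--         for i in range(len(lines))
--         if not _dropped(lines, i))
-- ===== Notes on version B (the rewrite author's own statement) =====
-- stated objective: alternative
-- what changed: Replaces A's stateful boolean-flag pass with a stateless per-line characterization: each line is kept or dropped independently by a backward search over the preceding lines (drop iff it is a stacktrace line and the nearest preceding marker-or-non-stacktrace line is a marker line), assembled by a single comprehension.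
import Mathlib
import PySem

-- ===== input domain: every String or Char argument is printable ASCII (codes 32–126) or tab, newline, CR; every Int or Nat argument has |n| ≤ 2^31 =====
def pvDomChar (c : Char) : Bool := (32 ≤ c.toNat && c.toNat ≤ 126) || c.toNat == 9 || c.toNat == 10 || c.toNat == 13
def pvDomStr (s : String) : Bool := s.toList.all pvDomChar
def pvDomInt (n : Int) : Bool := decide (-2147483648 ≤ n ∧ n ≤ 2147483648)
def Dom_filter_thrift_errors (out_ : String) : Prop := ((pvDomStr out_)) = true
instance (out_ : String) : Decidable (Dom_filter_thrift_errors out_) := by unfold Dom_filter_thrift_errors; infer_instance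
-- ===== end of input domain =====

-- B replaces A's stateful flag pass with a stateless per-line rule: each line is judged
-- independently by a backward search over the preceding lines; same result, different algorithm.

-- Shared helper: out.splitlines(True) (keepends). On the printable-ASCII+tab domain the only
-- line breaks are '\n', '\r' and '\r\n', so this hand port is exact there.
def pvSplitlinesKeep (cur : List Char) : List Char → List (List Char)
  | [] => if cur = [] then [] else [cur.reverse]
  | '\r' :: '\n' :: rest => (cur.reverse ++ ['\r', '\n']) :: pvSplitlinesKeep [] rest
  | '\r' :: rest => (cur.reverse ++ ['\r']) :: pvSplitlinesKeep [] rest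
  | '\n' :: rest => (cur.reverse ++ ['\n']) :: pvSplitlinesKeep [] rest
  | c :: rest => pvSplitlinesKeep (c :: cur) rest

def pvMarker : List Char := "Thrift error occurred during processing of message.".toList
def pvDots : List Char := "  .....\n".toList

-- ===== PORT A =====
-- one iteration of A's for-loop over (lines, flag); the 'continue' keeps the state,
-- the fall-through after clearing the flag repeats the marker test
def pvAStep (st : List (List Char) × Bool) (line : List Char) : List (List Char) × Bool :=
  if st.2 = true then
    let sline := PySem.Chars.lstrip line
    if PySem.Chars.startswith sline "at ".toList
        || PySem.Chars.startswith sline "...".toList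
        || PySem.Chars.startswith sline "Caused by: java.net.SocketException".toList
        || PySem.Chars.startswith sline "org.apache.thrift.transport.TTransportException".toList then
      st
    else if PySem.Chars.isIn pvMarker line then (st.1 ++ [PySem.Chars.rstrip line ++ pvDots], true)
    else (st.1 ++ [line], false)
  else
    if PySem.Chars.isIn pvMarker line then (st.1 ++ [PySem.Chars.rstrip line ++ pvDots], true)
    else (st.1 ++ [line], false)

-- ''.join(lines) over List Char is flatten
def filter_thrift_errors (out_ : String) : String :=
  String.ofList (((pvSplitlinesKeep [] out_.toList).foldl pvAStep ([], false)).1.flatten)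

-- ===== PORT B =====
def pvIsStacktrace (line : List Char) : Bool :=
  let s := PySem.Chars.lstrip line
  PySem.Chars.startswith s "at ".toList
    || PySem.Chars.startswith s "...".toList
    || PySem.Chars.startswith s "Caused by: java.net.SocketException".toList
    || PySem.Chars.startswith s "org.apache.thrift.transport.TTransportException".toList

-- the backward 'for j in range(i-1, -1, -1)' of _dropped, as a walk down the reversed prefix
def pvSearch : List (List Char) → Bool
  | [] => false
  | l :: rest =>
    if PySem.Chars.isIn pvMarker l then true
    else if pvIsStacktrace l then pvSearch rest
    else false

-- _dropped(lines, i); all indices come from range(len(lines)), so pyGetD's default is unreachable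
def pvDropped (lines : List (List Char)) (i : Int) : Bool :=
  if pvIsStacktrace (PySem.List.pyGetD lines i []) = false then false
  else pvSearch ((lines.take i.toNat).reverse)

def filter_thrift_errors_alt (out_ : String) : String :=
  let lines := pvSplitlinesKeep [] out_.toList
  String.ofList (((PySem.List.pyRange 0 (lines.length : Int) 1).filterMap (fun i =>
    if pvDropped lines i then none
    else some (if PySem.Chars.isIn pvMarker (PySem.List.pyGetD lines i []) then
                 PySem.Chars.rstrip (PySem.List.pyGetD lines i []) ++ pvDots
               else PySem.List.pyGetD lines i []))).flatten)

-- ===== PRECONDITION & SPEC =====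
def Spec_filter_thrift_errors (out_ : String) (out : String) : Prop := out = filter_thrift_errors_alt out_
instance (out_ : String) (out : String) : Decidable (Spec_filter_thrift_errors out_ out) := by unfold Spec_filter_thrift_errors; infer_instance

-- ===== CLAIM (what is proved, stated in full; the proofs are below) =====
def Claim_equal_filter_thrift_errors : Prop := ∀ (out_ : String), Dom_filter_thrift_errors out_ → Spec_filter_thrift_errors out_ (filter_thrift_errors out_)

-- ===== LEMMAS AND PROOFS =====

-- A's flag after processing a prefix is exactly B's backward search over that prefix reversed.
-- Main invariant: starting A's fold at index i with flag = pvSearch of the reversed prefix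
-- produces exactly B's per-index filterMap over the remaining indices.
theorem pvMain (lines : List (List Char)) :
    ∀ (k i : Nat) (acc : List (List Char)), i + k = lines.length →
    ((lines.drop i).foldl pvAStep (acc, pvSearch ((lines.take i).reverse))).1
      = acc ++ (PySem.List.pyRange (i : Int) (lines.length : Int) 1).filterMap (fun j =>
          if pvDropped lines j then none
          else some (if PySem.Chars.isIn pvMarker (PySem.List.pyGetD lines j []) then
                       PySem.Chars.rstrip (PySem.List.pyGetD lines j []) ++ pvDots
                     else PySem.List.pyGetD lines j [])) := by
  intro k
  induction k with
  | zero =>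
    intro i acc h
    have hi : i = lines.length := by omega
    subst hi
    rw [List.drop_length, PySem.List.pyRange_one_eq_nil (le_refl _)]
    simp
  | succ k ih =>
    intro i acc h
    have hi : i < lines.length := by omega
    have hdrop : lines.drop i = lines[i] :: lines.drop (i + 1) :=
      (List.getElem_cons_drop hi).symm
    have hget : PySem.List.pyGetD lines ((i : Nat) : Int) [] = lines[i] := by
      rw [PySem.List.pyGetD_natCast]
      exact List.getD_eq_getElem _ _ hi
    have htake : (lines.take (i + 1)).reverse = lines[i] :: (lines.take i).reverse := by
      rw [List.take_add_one, List.getElem?_eq_getElem hi]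
      simp
    have hstep : ∀ (a : List (List Char)) (f : Bool), pvAStep (a, f) lines[i] =
        if f && pvIsStacktrace lines[i] then (a, f)
        else if PySem.Chars.isIn pvMarker lines[i] then
          (a ++ [PySem.Chars.rstrip lines[i] ++ pvDots], true)
        else (a ++ [lines[i]], false) := by
      intro a f
      cases f <;> simp [pvAStep, pvIsStacktrace]
    have hrange : PySem.List.pyRange (i : Int) (lines.length : Int) 1
        = (i : Int) :: PySem.List.pyRange ((i : Int) + 1) (lines.length : Int) 1 :=
      PySem.List.pyRange_one_cons (by exact_mod_cast hi)
    have hdroppedi : pvDropped lines ((i : Nat) : Int)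
        = (pvIsStacktrace lines[i] && pvSearch ((lines.take i).reverse)) := by
      rw [pvDropped, hget]
      simp only [Int.toNat_natCast]
      cases pvIsStacktrace lines[i] <;> simp
    rw [hdrop, List.foldl_cons, hstep, hrange, List.filterMap_cons]
    simp only [hget]
    by_cases hd : (pvSearch ((lines.take i).reverse) && pvIsStacktrace lines[i]) = true
    · obtain ⟨hf, hs⟩ := Bool.and_eq_true_iff.mp hd
      have hsrch : pvSearch ((lines.take (i + 1)).reverse) = true := by
        rw [htake, pvSearch, hs]
        cases PySem.Chars.isIn pvMarker lines[i] <;> simp [hf]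
      simp only [hdroppedi, hf, hs, Bool.and_self, if_true]
      have hT := ih (i + 1) acc (by omega)
      rw [hsrch] at hT
      push_cast at hT ⊢
      exact hT
    · have hd' : (pvIsStacktrace lines[i] && pvSearch ((lines.take i).reverse)) = false := by
        cases h1 : pvIsStacktrace lines[i] <;> cases h2 : pvSearch ((lines.take i).reverse) <;>
          simp_all
      have hsrch : pvSearch ((lines.take (i + 1)).reverse)
          = PySem.Chars.isIn pvMarker lines[i] := by
        rw [htake, pvSearch]
        cases hm : PySem.Chars.isIn pvMarker lines[i] <;>
          cases h1 : pvIsStacktrace lines[i] <;> cases h2 : pvSearch ((lines.take i).reverse) <;>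
            simp_all
      rw [eq_false_of_ne_true hd]
      simp only [hdroppedi, hd', Bool.false_eq_true, if_false]
      cases hm : PySem.Chars.isIn pvMarker lines[i]
      · simp only [Bool.false_eq_true, if_false]
        have hT := ih (i + 1) (acc ++ [lines[i]]) (by omega)
        rw [hsrch, hm] at hT
        push_cast at hT ⊢
        rw [hT]
        simp
      · simp only [if_true]
        have hT := ih (i + 1) (acc ++ [PySem.Chars.rstrip lines[i] ++ pvDots]) (by omega)
        rw [hsrch, hm] at hT
        push_cast at hT ⊢
        rw [hT]
        simp

-- ===== VERDICT (by name: the statement is the Claim_ definition above) =====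
theorem filter_thrift_errors_spec : Claim_equal_filter_thrift_errors := by
  intro out_ _
  unfold Spec_filter_thrift_errors filter_thrift_errors filter_thrift_errors_alt
  have h := pvMain (pvSplitlinesKeep [] out_.toList) (pvSplitlinesKeep [] out_.toList).length 0 [] (by omega)
  simp only [List.drop_zero, List.take_zero, List.reverse_nil, Nat.cast_zero, List.nil_append] at h
  rw [show pvSearch [] = false from rfl] at h
  rw [h]
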